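-- pv_equiv track=rewrite | github.com/lavrenicus/MM7Deshifr | main.py | restoreText
-- ===== SOURCE A (Python) =====
-- def restoreText(origText, cipferText):
--     result = cipferText
--     upperIndexes = []
--     for index, letter in enumerate(origText):
--         if not letter.isalpha():
--             result = result[:index] + letter + result[index:]
--         if letter.isupper():
--             upperIndexes.append(index)
--
--     result = "".join(c.upper() if i in upperIndexes else c for i, c in enumerate(result))
--     return result
-- ===== SOURCE B (Python) =====
-- def restoreText(origText, cipferText):
--     it = iter(cipferText)
--     out = []
--     for ch in origText:
--         if not ch.isalpha():
--             out.append(ch)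
--         else:
--             c = next(it, '')
--             out.append(c.upper() if ch.isupper() else c)
--     out.append(''.join(it))
--     return ''.join(out)
-- ===== Notes on version B (the rewrite author's own statement) =====
-- stated objective: simpler
-- what changed: A repeatedly rebuilds the growing result string by slicing/insertion and then makes a second enumerate pass testing each index against an upperIndexes list; B is a single pass over origText consuming cipferText through an iterator, restoring case on the fly and appending any leftover cipher at the end.
import Mathlib
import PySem

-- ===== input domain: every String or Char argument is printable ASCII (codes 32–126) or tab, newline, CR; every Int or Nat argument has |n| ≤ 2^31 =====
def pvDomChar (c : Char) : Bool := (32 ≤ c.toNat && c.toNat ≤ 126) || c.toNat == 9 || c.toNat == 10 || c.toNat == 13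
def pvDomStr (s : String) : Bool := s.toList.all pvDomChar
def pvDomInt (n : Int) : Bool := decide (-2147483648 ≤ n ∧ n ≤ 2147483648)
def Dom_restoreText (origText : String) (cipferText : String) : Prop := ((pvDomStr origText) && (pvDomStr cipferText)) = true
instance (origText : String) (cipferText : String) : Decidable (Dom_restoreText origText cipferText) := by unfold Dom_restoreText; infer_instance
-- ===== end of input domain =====

-- B replaces A's repeated string slicing/insertion and the second uppercase-index pass by one
-- pass that consumes the cipher with an iterator and appends any leftover cipher at the end
-- (objective: simpler). Equivalence is proved for all inputs; Dom is not needed beyond the statement.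

-- ===== PORT A =====
-- the for-loop over enumerate(origText): index counter + state (result, upperIndexes);
-- result[:index] / result[index:] are PySem.List.slice (exact, incl. clamping past the end)
def pvLoopA : List Char → Int → List Char → List Int → (List Char × List Int)
  | [], _, res, ups => (res, ups)
  | letter :: rest, index, res, ups =>
      let res' := if ¬ PySem.Chars.isalpha letter then
          PySem.List.slice res none (some index) ++ letter :: PySem.List.slice res (some index) none
        else res
      let ups' := if PySem.Chars.isupper letter then ups ++ [index] else ups
      pvLoopA rest (index + 1) res' ups'

def restoreText (origText : String) (cipferText : String) : String :=
  let st := pvLoopA origText.toList 0 cipferText.toList []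
  -- "".join(c.upper() if i in upperIndexes else c for i, c in enumerate(result))
  String.ofList ((PySem.List.enumerate st.1 0).map
    (fun p => if p.1 ∈ st.2 then PySem.Chars.upperChar p.2 else p.2))

-- ===== PORT B =====
-- one pass over origText consuming the cipher list (the iterator); base case = the
-- leftover cipher appended at the end; exhausted cipher = next(it, '') appends nothing
def pvGoB : List Char → List Char → List Char
  | [], cs => cs
  | ch :: os, cs =>
      if ¬ PySem.Chars.isalpha ch then ch :: pvGoB os cs
      else match cs with
        | [] => pvGoB os []
        | c :: cs' => (if PySem.Chars.isupper ch then PySem.Chars.upperChar c else c) :: pvGoB os cs'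

def restoreText_alt (origText : String) (cipferText : String) : String :=
  String.ofList (pvGoB origText.toList cipferText.toList)

-- ===== PRECONDITION & SPEC =====
def Spec_restoreText (origText : String) (cipferText : String) (out : String) : Prop := out = restoreText_alt origText cipferText
instance (origText : String) (cipferText : String) (out : String) : Decidable (Spec_restoreText origText cipferText out) := by unfold Spec_restoreText; infer_instance

-- ===== CLAIM (what is proved, stated in full; the proofs are below) =====
def Claim_equal_restoreText : Prop := ∀ (origText : String) (cipferText : String), Dom_restoreText origText cipferText → Spec_restoreText origText cipferText (restoreText origText cipferText)

-- ===== LEMMAS AND PROOFS =====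

-- the case-less merge of orig's non-alpha chars with the cipher chars
def pvMix : List Char → List Char → List Char
  | [], cs => cs
  | o :: os, cs =>
      if ¬ PySem.Chars.isalpha o then o :: pvMix os cs
      else match cs with
        | [] => pvMix os []
        | c :: cs' => c :: pvMix os cs'

-- the uppercase indices of orig, counted from k
def pvUpsFrom : Int → List Char → List Int
  | _, [] => []
  | k, o :: os => (if PySem.Chars.isupper o then [k] else []) ++ pvUpsFrom (k + 1) os

theorem pvMix_nonalpha {o : Char} (os cs : List Char) (ha : PySem.Chars.isalpha o = false) :
    pvMix (o :: os) cs = o :: pvMix os cs := by simp [pvMix, ha]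

theorem pvMix_alpha_nil {o : Char} (os : List Char) (ha : PySem.Chars.isalpha o = true) :
    pvMix (o :: os) [] = pvMix os [] := by simp [pvMix, ha]

theorem pvMix_alpha_cons {o : Char} (os : List Char) (c : Char) (cs : List Char)
    (ha : PySem.Chars.isalpha o = true) :
    pvMix (o :: os) (c :: cs) = c :: pvMix os cs := by simp [pvMix, ha]

theorem isupper_of_not_isalpha {c : Char} (h : PySem.Chars.isalpha c = false) :
    PySem.Chars.isupper c = false := by
  simp [PySem.Chars.isalpha] at h; exact h.1

theorem upperChar_of_not_isalpha {c : Char} (h : PySem.Chars.isalpha c = false) :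
    PySem.Chars.upperChar c = c := by
  simp [PySem.Chars.isalpha] at h
  simp [PySem.Chars.upperChar, h.2]

theorem mem_pvUpsFrom_ge : ∀ (os : List Char) (k j : Int), j ∈ pvUpsFrom k os → k ≤ j := by
  intro os
  induction os with
  | nil => intro k j h; simp [pvUpsFrom] at h
  | cons o os ih =>
      intro k j h
      simp only [pvUpsFrom, List.mem_append] at h
      rcases h with h | h
      · by_cases hu : PySem.Chars.isupper o
        · simp [hu] at h; omega
        · simp [hu] at h
      · have := ih (k + 1) j h; omega

theorem not_mem_pvUpsFrom_succ (os : List Char) (k : Int) :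
    (k ∈ pvUpsFrom (k + 1) os) = False := by
  simp only [eq_iff_iff, iff_false]
  intro h; have := mem_pvUpsFrom_ge os (k + 1) k h; omega

theorem take_append_insert (d cs : List Char) (o : Char) (k : Nat)
    (hk : d.length ≤ k) (hcs : cs ≠ [] → k = d.length) :
    (d ++ cs).take k ++ o :: (d ++ cs).drop k = (d ++ [o]) ++ cs := by
  cases cs with
  | nil =>
      simp only [List.append_nil]
      rw [List.take_of_length_le hk, List.drop_of_length_le hk]
  | cons c cs' =>
      have h := hcs (by simp)
      subst h
      simp

theorem pvLoopA_eq : ∀ (os : List Char) (d cs : List Char) (k : Nat) (ups : List Int),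
    d.length ≤ k → (cs ≠ [] → k = d.length) →
    pvLoopA os (k : Int) (d ++ cs) ups = (d ++ pvMix os cs, ups ++ pvUpsFrom (k : Int) os) := by
  intro os
  induction os with
  | nil => intro d cs k ups _ _; simp [pvLoopA, pvMix, pvUpsFrom]
  | cons o os ih =>
      intro d cs k ups hk hcs
      have hcast : (k : Int) + 1 = ((k + 1 : Nat) : Int) := by push_cast; ring
      have hups : (if PySem.Chars.isupper o then ups ++ [(k : Int)] else ups)
          = ups ++ (if PySem.Chars.isupper o then [(k : Int)] else []) := by split <;> simp
      by_cases ha : PySem.Chars.isalpha o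
      · cases cs with
        | nil =>
            have h1 := ih d [] (k + 1) (ups ++ (if PySem.Chars.isupper o then [(k : Int)] else []))
              (by omega) (by simp)
            simp only [pvLoopA, ha, not_true_eq_false, if_false]
            rw [hups, hcast, h1, pvMix_alpha_nil os ha]
            simp only [pvUpsFrom, List.append_assoc, ← hcast]
        | cons c cs' =>
            have hlen : k = d.length := hcs (by simp)
            have h1 := ih (d ++ [c]) cs' (k + 1) (ups ++ (if PySem.Chars.isupper o then [(k : Int)] else []))
              (by simp; omega) (by intro _; simp; omega)
            simp only [pvLoopA, ha, not_true_eq_false, if_false]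
            rw [hups, show d ++ c :: cs' = (d ++ [c]) ++ cs' by simp, hcast, h1,
              pvMix_alpha_cons os c cs' ha]
            simp only [pvUpsFrom, List.append_assoc, ← hcast]
            simp
      · have ha' : PySem.Chars.isalpha o = false := by simpa using ha
        have hu : PySem.Chars.isupper o = false := isupper_of_not_isalpha ha'
        have h1 := ih (d ++ [o]) cs (k + 1)
          ups (by simp; omega) (by intro h; have := hcs h; simp; omega)
        simp only [pvLoopA]
        rw [if_pos ha, if_neg (show ¬ PySem.Chars.isupper o = true by simp [hu]),
          PySem.List.slice_to_natCast, PySem.List.slice_from_natCast,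
          take_append_insert d cs o k hk hcs, hcast, h1, pvMix_nonalpha os cs ha']
        simp only [pvUpsFrom, hu, Bool.false_eq_true, if_false, List.nil_append,
          List.append_assoc, ← hcast]
        simp

theorem pvGoB_nil : ∀ (os : List Char), pvGoB os [] = pvMix os [] := by
  intro os
  induction os with
  | nil => rfl
  | cons o os ih => by_cases h : PySem.Chars.isalpha o <;> simp [pvGoB, pvMix, h, ih]

theorem pvMix_nil_nonalpha : ∀ (os : List Char), ∀ ch ∈ pvMix os [], PySem.Chars.isalpha ch = false := by
  intro os
  induction os with
  | nil => intro ch h; simp [pvMix] at h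
  | cons o os ih =>
      intro ch h
      by_cases ha : PySem.Chars.isalpha o
      · rw [pvMix_alpha_nil os ha] at h
        exact ih ch h
      · have ha' : PySem.Chars.isalpha o = false := by simpa using ha
        rw [pvMix_nonalpha os [] ha', List.mem_cons] at h
        rcases h with rfl | h
        · exact ha'
        · exact ih ch h

theorem map_enum_id : ∀ (l : List Char) (k : Int) (ups : List Int),
    (∀ ch ∈ l, PySem.Chars.isalpha ch = false) →
    (PySem.List.enumerate l k).map (fun p => if p.1 ∈ ups then PySem.Chars.upperChar p.2 else p.2) = l := by
  intro l
  induction l with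
  | nil => intro k ups _; simp [PySem.List.enumerate]
  | cons c l ih =>
      intro k ups h
      rw [PySem.List.enumerate_cons]
      simp only [List.map_cons]
      rw [ih (k + 1) ups (fun ch hch => h ch (List.mem_cons_of_mem _ hch))]
      have := upperChar_of_not_isalpha (h c (List.mem_cons_self ..))
      split <;> simp [this]

theorem final_map_eq : ∀ (os cs : List Char) (k : Int),
    (PySem.List.enumerate (pvMix os cs) k).map
      (fun p => if p.1 ∈ pvUpsFrom k os then PySem.Chars.upperChar p.2 else p.2) = pvGoB os cs := by
  intro os
  induction os with
  | nil =>
      intro cs k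
      simp only [pvMix, pvGoB, pvUpsFrom]
      have hcg : ∀ p ∈ PySem.List.enumerate cs k,
          (if p.1 ∈ ([] : List Int) then PySem.Chars.upperChar p.2 else p.2) = p.2 := by
        intro p _; simp
      exact (List.map_congr_left hcg).trans (by simp)
  | cons o os ih =>
      intro cs k
      by_cases ha : PySem.Chars.isalpha o
      · cases cs with
        | nil =>
            -- cipher exhausted: everything left is non-alpha, upper-casing is the identity
            rw [pvMix_alpha_nil os ha]
            simp only [pvGoB, ha, not_true_eq_false, if_false]
            rw [map_enum_id _ _ _ (pvMix_nil_nonalpha os), pvGoB_nil]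
        | cons c cs' =>
            rw [pvMix_alpha_cons os c cs' ha, PySem.List.enumerate_cons]
            simp only [pvGoB, ha, not_true_eq_false, if_false, List.map_cons]
            congr 1
            · -- head: k is in pvUpsFrom k (o :: os) iff o is uppercase
              simp [pvUpsFrom, not_mem_pvUpsFrom_succ os k]
            · -- tail: indices are ≥ k+1, membership reduces to pvUpsFrom (k+1) os
              rw [← ih cs' (k + 1)]
              apply List.map_congr_left
              intro p hp
              rw [PySem.List.mem_enumerate_iff] at hp
              obtain ⟨m, hm, rfl⟩ := hp
              have hne : (k + 1 + (m : Int)) ≠ k := by omega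
              simp only [pvUpsFrom, List.mem_append]
              by_cases hup : PySem.Chars.isupper o <;> simp [hup, hne]
      · have ha' : PySem.Chars.isalpha o = false := by simpa using ha
        have hu : PySem.Chars.isupper o = false := isupper_of_not_isalpha ha'
        rw [pvMix_nonalpha os cs ha', PySem.List.enumerate_cons]
        simp only [pvGoB, ha', List.map_cons, pvUpsFrom, hu,
          Bool.false_eq_true, if_false, List.nil_append]
        congr 1
        · simp [not_mem_pvUpsFrom_succ os k]
        · exact ih cs (k + 1)

-- ===== VERDICT (by name: the statement is the Claim_ definition above) =====
theorem restoreText_spec : Claim_equal_restoreText := by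
  intro origText cipferText _
  unfold Spec_restoreText restoreText restoreText_alt
  have h := pvLoopA_eq origText.toList [] cipferText.toList 0 [] (by simp) (by simp)
  simp only [Nat.cast_zero, List.nil_append] at h
  rw [h]
  simp only
  rw [final_map_eq]
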